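-- pv_equiv track=rewrite | github.com/wnstnb/search_topics_perplexity | agents/typefully_drafts.py | _split_by_words
-- ===== SOURCE A (Python) =====
-- from typing import List, Dict, Any, Optional, Union, Tuple
--
-- def _split_by_words(text: str, max_length: int) -> List[str]:
--     """Split text by words when sentences are too long"""
--     words = text.split()
--     tweets = []
--     current_tweet = ""
--
--     for word in words:
--         test_tweet = current_tweet + (" " if current_tweet else "") + word
--
--         if len(test_tweet) <= max_length:
--             current_tweet = test_tweet
--         else:
--             if current_tweet:
--                 tweets.append(current_tweet)
--             current_tweet = word
--
--             # Handle extremely long words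
--             if len(current_tweet) > max_length:
--                 while len(current_tweet) > max_length:
--                     tweets.append(current_tweet[:max_length])
--                     current_tweet = current_tweet[max_length:]
--
--     if current_tweet:
--         tweets.append(current_tweet)
--
--     return tweets
-- ===== SOURCE B (Python) =====
-- from typing import List
--
--
-- def _split_by_words(text: str, max_length: int) -> List[str]:
--     # Pre-split over-long words into max_length-sized pieces, then pack
--     # tokens into chunks by taking a maximal run of tokens per chunk.
--     tokens = []
--     for word in text.split():
--         while len(word) > max_length:
--             tokens.append(word[:max_length])
--             word = word[max_length:]
--         tokens.append(word)
--
--     chunks = []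
--     i = 0
--     while i < len(tokens):
--         chunk = tokens[i]
--         i += 1
--         while i < len(tokens) and len(chunk) + 1 + len(tokens[i]) <= max_length:
--             chunk = chunk + " " + tokens[i]
--             i += 1
--         chunks.append(chunk)
--     return chunks
-- ===== Notes on version B (the rewrite author's own statement) =====
-- stated objective: alternative
-- what changed: B decomposes the work into two phases: it first expands every over-long word into max_length-sized tokens, then emits each chunk by consuming a maximal run of tokens, instead of A's single stateful loop that threads a current-tweet accumulator and runs an inner while on over-long words.
import Mathlib
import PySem

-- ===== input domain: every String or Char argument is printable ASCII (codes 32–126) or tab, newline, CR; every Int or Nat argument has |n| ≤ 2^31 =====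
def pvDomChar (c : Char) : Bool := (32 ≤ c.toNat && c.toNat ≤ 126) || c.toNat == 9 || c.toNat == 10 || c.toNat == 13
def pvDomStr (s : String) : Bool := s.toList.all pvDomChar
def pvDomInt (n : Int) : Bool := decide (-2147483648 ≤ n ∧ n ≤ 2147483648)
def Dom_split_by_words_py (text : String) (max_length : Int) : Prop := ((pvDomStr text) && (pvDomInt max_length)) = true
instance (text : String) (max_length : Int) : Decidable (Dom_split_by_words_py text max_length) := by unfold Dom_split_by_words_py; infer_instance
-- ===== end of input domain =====

-- B replaces A's stateful greedy loop (current tweet + inner while for long words) by a two-phase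
-- decomposition: pre-split long words into max_length pieces, then emit chunks by taking a maximal
-- run of tokens per chunk (objective: alternative decomposition, same asymptotic cost).

-- ===== PORT A =====
-- the inner 'while len(current_tweet) > max_length' loop; the extra '1 ≤ m' conjunct only makes the
-- recursion total (Python diverges when max_length ≤ 0 and the word is over-long; excluded by Pre_)
def splitLongA (m : Int) (tweets : List (List Char)) (cur : List Char) : List (List Char) × List Char :=
  if _h : m < (cur.length : Int) ∧ 1 ≤ m then
    splitLongA m (tweets ++ [PySem.List.slice cur none (some m)]) (PySem.List.slice cur (some m) none)
  else (tweets, cur)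
termination_by cur.length
decreasing_by
  rw [PySem.List.slice_from cur (by omega : (0:Int) ≤ m), List.length_drop]
  omega

def stepA (m : Int) (st : List (List Char) × List Char) (word : List Char) : List (List Char) × List Char :=
  let test := st.2 ++ (if st.2.isEmpty then [] else [' ']) ++ word
  if (test.length : Int) ≤ m then (st.1, test)
  else
    let tweets1 := if st.2.isEmpty then st.1 else st.1 ++ [st.2]
    if m < (word.length : Int) then splitLongA m tweets1 word else (tweets1, word)

def split_by_words_py (text : String) (max_length : Int) : List String :=
  let st := (PySem.Chars.split₀ text.toList).foldl (stepA max_length) ([], [])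
  (if st.2.isEmpty then st.1 else st.1 ++ [st.2]).map (fun cs => String.ofList cs)

-- ===== PORT B =====
-- the 'while len(word) > max_length' token-building loop of B ('1 ≤ m' again only for totality)
def explodeB (m : Int) (w : List Char) : List (List Char) :=
  if _h : m < (w.length : Int) ∧ 1 ≤ m then
    PySem.List.slice w none (some m) :: explodeB m (PySem.List.slice w (some m) none)
  else [w]
termination_by w.length
decreasing_by
  rw [PySem.List.slice_from w (by omega : (0:Int) ≤ m), List.length_drop]
  omega

-- the inner 'while i < len(tokens) and len(chunk) + 1 + len(tokens[i]) <= max_length' loop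
def takeChunkB (m : Int) (chunk : List Char) (toks : List (List Char)) : List Char × List (List Char) :=
  match toks with
  | [] => (chunk, [])
  | t :: rest =>
      if (chunk.length : Int) + 1 + (t.length : Int) ≤ m then takeChunkB m (chunk ++ ' ' :: t) rest
      else (chunk, t :: rest)

theorem takeChunkB_rest_le (m : Int) (c : List Char) (toks : List (List Char)) :
    (takeChunkB m c toks).2.length ≤ toks.length := by
  induction toks generalizing c with
  | nil => simp [takeChunkB]
  | cons t rest ih =>
      simp only [takeChunkB]
      split
      · exact Nat.le_trans (ih _) (Nat.le_succ _)
      · simp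

-- the outer 'while i < len(tokens)' chunk-emitting loop
def packB (m : Int) (toks : List (List Char)) : List (List Char) :=
  match _h : toks with
  | [] => []
  | t :: rest =>
      let p := takeChunkB m t rest
      p.1 :: packB m p.2
termination_by toks.length
decreasing_by
  have := takeChunkB_rest_le m t rest
  simp only [List.length_cons]
  omega

def split_by_words_py_alt (text : String) (max_length : Int) : List String :=
  let tokens := (PySem.Chars.split₀ text.toList).foldl (fun acc w => acc ++ explodeB max_length w) []
  (packB max_length tokens).map (fun cs => String.ofList cs)

-- ===== PRECONDITION & SPEC =====
-- Pre_ excludes exactly the inputs on which A never returns: max_length ≤ 0 together with at least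
-- one word in the text makes A's inner while loop spin forever (cur[:max_length] is empty there).
def Pre_split_by_words_py (text : String) (max_length : Int) : Prop :=
  1 ≤ max_length ∨ PySem.Chars.split₀ text.toList = []
instance (text : String) (max_length : Int) : Decidable (Pre_split_by_words_py text max_length) := by
  unfold Pre_split_by_words_py; infer_instance

def pvWitness_split_by_words_py : String × Int := ("hello world", 5)

def Spec_split_by_words_py (text : String) (max_length : Int) (out : List String) : Prop := out = split_by_words_py_alt text max_length
instance (text : String) (max_length : Int) (out : List String) : Decidable (Spec_split_by_words_py text max_length out) := by unfold Spec_split_by_words_py; infer_instance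

-- ===== CLAIM (what is proved, stated in full; the proofs are below) =====
def Claim_equal_split_by_words_py : Prop := ∀ (text : String) (max_length : Int), Dom_split_by_words_py text max_length → Pre_split_by_words_py text max_length → Spec_split_by_words_py text max_length (split_by_words_py text max_length)

-- ===== LEMMAS AND PROOFS =====

-- greedy packing of tokens starting from a partial chunk c (proof-side reference shape)
def packFrom (m : Int) (c : List Char) (toks : List (List Char)) : List (List Char) :=
  match toks with
  | [] => [c]
  | t :: ts =>
      if (c.length : Int) + 1 + (t.length : Int) ≤ m then packFrom m (c ++ ' ' :: t) ts
      else c :: packFrom m t ts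

theorem takeChunk_packFrom (m : Int) (ts : List (List Char)) : ∀ c,
    (takeChunkB m c ts).1 :: packB m (takeChunkB m c ts).2 = packFrom m c ts := by
  induction ts with
  | nil => intro c; simp [takeChunkB, packB, packFrom]
  | cons t rest ih =>
      intro c
      simp only [takeChunkB, packFrom]
      split
      · exact ih _
      · simp only [packB]
        rw [ih t]

theorem packB_cons (m : Int) (t : List Char) (ts : List (List Char)) :
    packB m (t :: ts) = packFrom m t ts := by
  rw [packB]
  exact takeChunk_packFrom m ts t

theorem explodeB_ne_nil (m : Int) (w : List Char) : explodeB m w ≠ [] := by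
  rw [explodeB]
  split <;> simp

-- the head piece of an over-long word has length exactly m
theorem slice_head_len (m : Int) (w : List Char) (h1 : m < (w.length : Int)) (h2 : 1 ≤ m) :
    ((PySem.List.slice w none (some m)).length : Int) = m := by
  rw [PySem.List.slice_to w (by omega : (0:Int) ≤ m), List.length_take]
  omega

theorem slice_tail_ne_nil (m : Int) (w : List Char) (h1 : m < (w.length : Int)) (h2 : 1 ≤ m) :
    PySem.List.slice w (some m) none ≠ [] := by
  rw [PySem.List.slice_from w (by omega : (0:Int) ≤ m)]
  intro hc
  have := congrArg List.length hc
  simp only [List.length_drop, List.length_nil] at this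
  omega

-- A's inner while loop appends all pieces of the word but the last and keeps the last as current
theorem splitLongA_eq_explodeB (m : Int) (w : List Char) : ∀ T,
    splitLongA m T w = (T ++ (explodeB m w).dropLast, (explodeB m w).getLastD []) := by
  induction w using explodeB.induct m with
  | case1 w hg ih =>
      intro T
      rw [splitLongA, explodeB, dif_pos hg, dif_pos hg, ih]
      obtain ⟨e, es, he⟩ := List.exists_cons_of_ne_nil
        (explodeB_ne_nil m (PySem.List.slice w (some m) none))
      rw [he]
      simp
  | case2 w hg =>
      intro T
      rw [splitLongA, explodeB, dif_neg hg, dif_neg hg]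
      simp

-- the last piece kept as current is nonempty and fits
theorem explodeB_last_ok (m : Int) (hm : 1 ≤ m) : ∀ (w : List Char), w ≠ [] →
    (explodeB m w).getLastD [] ≠ [] ∧ (((explodeB m w).getLastD []).length : Int) ≤ m := by
  intro w
  induction w using explodeB.induct m with
  | case1 w hg ih =>
      intro _
      rw [explodeB, dif_pos hg]
      obtain ⟨e, es, he⟩ := List.exists_cons_of_ne_nil
        (explodeB_ne_nil m (PySem.List.slice w (some m) none))
      rw [he] at ih ⊢
      simpa using ih (slice_tail_ne_nil m w hg.1 hg.2)
  | case2 w hg =>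
      intro hw
      rw [explodeB, dif_neg hg]
      have hone : ([w].getLastD []) = w := rfl
      rw [hone]
      constructor
      · exact hw
      · have h1 : 0 < w.length := List.length_pos_of_ne_nil hw
        omega

-- packFrom, started from a chunk already of length ≥ m, emits the pieces of an over-long word
-- one per chunk and continues from the last piece
theorem packFrom_explodeB (m : Int) (hm : 1 ≤ m) : ∀ (w : List Char), w ≠ [] →
    ∀ (p : List Char), m ≤ (p.length : Int) → ∀ T,
    packFrom m p (explodeB m w ++ T)
      = p :: ((explodeB m w).dropLast ++ packFrom m ((explodeB m w).getLastD []) T) := by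
  intro w
  induction w using explodeB.induct m with
  | case1 w hg ih =>
      intro _ p hp T
      rw [explodeB, dif_pos hg]
      have hw0 := slice_head_len m w hg.1 hg.2
      have hw' := slice_tail_ne_nil m w hg.1 hg.2
      obtain ⟨e, es, he⟩ := List.exists_cons_of_ne_nil
        (explodeB_ne_nil m (PySem.List.slice w (some m) none))
      simp only [List.cons_append, packFrom]
      rw [if_neg (by omega)]
      rw [ih hw' _ (le_of_eq hw0.symm) T, he]
      simp [List.dropLast_cons₂]
  | case2 w hg =>
      intro hw p hp T
      rw [explodeB, dif_neg hg]
      have h1 : 0 < w.length := List.length_pos_of_ne_nil hw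
      simp only [List.cons_append, packFrom]
      rw [if_neg (by omega)]
      simp [List.getLastD]

-- greedy state continuation: pending chunk c followed by the remaining tokens
def Fc (m : Int) (c : List Char) (toks : List (List Char)) : List (List Char) :=
  if c.isEmpty then packB m toks else packFrom m c toks

-- one word of A's loop = consuming that word's tokens in B's packing
theorem stepA_tokens (m : Int) (hm : 1 ≤ m) (c w : List Char)
    (hc : (c.length : Int) ≤ m) (hw : w ≠ []) :
    ∃ Δ c', (∀ t, stepA m (t, c) w = (t ++ Δ, c')) ∧ c' ≠ [] ∧ (c'.length : Int) ≤ m ∧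
      ∀ S, Fc m c (explodeB m w ++ S) = Δ ++ packFrom m c' S := by
  have hwl : 0 < w.length := List.length_pos_of_ne_nil hw
  by_cases hce : c.isEmpty
  · -- empty current tweet: the test tweet is the word itself
    have hc0 : c = [] := List.isEmpty_iff.mp hce
    subst hc0
    by_cases hfit : ((w.length : Int)) ≤ m
    · refine ⟨[], w, ?_, hw, hfit, ?_⟩
      · intro t
        simp [stepA, hfit]
      · intro S
        rw [explodeB, dif_neg (by omega)]
        simp only [Fc, List.isEmpty_nil, if_true, List.nil_append, List.cons_append]
        rw [packB_cons]
    · -- over-long word straight into the while loop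
      refine ⟨(explodeB m w).dropLast, (explodeB m w).getLastD [], ?_,
        (explodeB_last_ok m hm w hw).1, (explodeB_last_ok m hm w hw).2, ?_⟩
      · intro t
        simp only [stepA, List.isEmpty_nil, if_true, List.nil_append, List.append_nil]
        rw [if_neg (by simpa using hfit), if_pos (by omega)]
        simpa using splitLongA_eq_explodeB m w t
      · intro S
        have hg : m < (w.length : Int) ∧ 1 ≤ m := ⟨by omega, hm⟩
        have hw0 := slice_head_len m w hg.1 hm
        have hw' := slice_tail_ne_nil m w hg.1 hm
        have hrec := packFrom_explodeB m hm (PySem.List.slice w (some m) none) hw'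
          (PySem.List.slice w none (some m)) (le_of_eq hw0.symm) S
        obtain ⟨e, es, he⟩ := List.exists_cons_of_ne_nil
          (explodeB_ne_nil m (PySem.List.slice w (some m) none))
        simp only [Fc, List.isEmpty_nil, if_true]
        rw [explodeB, dif_pos hg, List.cons_append, packB_cons, hrec, he]
        simp [List.dropLast_cons₂]
  · -- nonempty current tweet
    have hcne : c ≠ [] := by intro h; subst h; simp at hce
    have hceb : c.isEmpty = false := by simpa using hce
    have hcl : 0 < c.length := List.length_pos_of_ne_nil hcne
    by_cases hfit : ((c.length : Int) + 1 + (w.length : Int)) ≤ m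
    · -- word joins the current tweet
      refine ⟨[], c ++ ' ' :: w, ?_, by simp, ?_, ?_⟩
      · intro t
        simp only [stepA, hceb, Bool.false_eq_true, if_false]
        split_ifs with h1 h2
        · simp
        · exfalso
          simp only [List.length_append, List.length_cons, List.length_nil] at h1
          push_cast at h1
          omega
        · exfalso
          simp only [List.length_append, List.length_cons, List.length_nil] at h1
          push_cast at h1
          omega
      · simp only [List.length_cons, List.length_append]
        push_cast
        omega
      · intro S
        rw [explodeB, dif_neg (by omega)]
        simp only [Fc, hceb, Bool.false_eq_true, if_false, List.cons_append, packFrom]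
        rw [if_pos hfit]
        simp
    · by_cases hlong : m < (w.length : Int)
      · -- over-long word: flush the current tweet, then the while loop
        refine ⟨c :: (explodeB m w).dropLast, (explodeB m w).getLastD [], ?_,
          (explodeB_last_ok m hm w hw).1, (explodeB_last_ok m hm w hw).2, ?_⟩
        · intro t
          simp only [stepA, hceb, Bool.false_eq_true, if_false]
          split_ifs with h1
          · exfalso
            simp only [List.length_append, List.length_cons, List.length_nil] at h1
            push_cast at h1
            omega
          · rw [splitLongA_eq_explodeB]
            simp
        · intro S
          have hg : m < (w.length : Int) ∧ 1 ≤ m := ⟨hlong, hm⟩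
          have hw0 := slice_head_len m w hlong hm
          have hw' := slice_tail_ne_nil m w hlong hm
          have hrec := packFrom_explodeB m hm (PySem.List.slice w (some m) none) hw'
            (PySem.List.slice w none (some m)) (le_of_eq hw0.symm) S
          obtain ⟨e, es, he⟩ := List.exists_cons_of_ne_nil
            (explodeB_ne_nil m (PySem.List.slice w (some m) none))
          simp only [Fc, hceb, Bool.false_eq_true, if_false]
          rw [explodeB, dif_pos hg, List.cons_append]
          simp only [packFrom]
          rw [if_neg (by omega), hrec, he]
          simp [List.dropLast_cons₂]
      · -- word fits alone but not together: flush and restart from the word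
        refine ⟨[c], w, ?_, hw, by omega, ?_⟩
        · intro t
          simp only [stepA, hceb, Bool.false_eq_true, if_false]
          split_ifs with h1
          · exfalso
            simp only [List.length_append, List.length_cons, List.length_nil] at h1
            push_cast at h1
            omega
          · simp
        · intro S
          rw [explodeB, dif_neg (by omega)]
          simp only [Fc, hceb, Bool.false_eq_true, if_false, List.cons_append, packFrom]
          rw [if_neg hfit]
          simp

-- A's whole loop + final flush = B's packing of the exploded tokens
theorem foldA_eq (m : Int) (hm : 1 ≤ m) : ∀ (words : List (List Char)),
    (∀ w ∈ words, w ≠ []) → ∀ t c, (c.length : Int) ≤ m →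
    (if (words.foldl (stepA m) (t, c)).2.isEmpty then (words.foldl (stepA m) (t, c)).1
     else (words.foldl (stepA m) (t, c)).1 ++ [(words.foldl (stepA m) (t, c)).2])
      = t ++ Fc m c (words.flatMap (explodeB m)) := by
  intro words
  induction words with
  | nil =>
      intro _ t c _
      simp only [List.foldl_nil, List.flatMap_nil, Fc]
      by_cases hce : c.isEmpty
      · have hc0 : c = [] := List.isEmpty_iff.mp hce
        subst hc0
        simp [packB]
      · simp [hce, packFrom]
  | cons w ws ih =>
      intro hne t c hc
      obtain ⟨Δ, c', hstep, hcne, hcle, hF⟩ :=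
        stepA_tokens m hm c w hc (hne w (by simp))
      simp only [List.foldl_cons, hstep t]
      rw [ih (fun x hx => hne x (by simp [hx])) (t ++ Δ) c' hcle]
      have : Fc m c' (ws.flatMap (explodeB m)) = packFrom m c' (ws.flatMap (explodeB m)) := by
        simp [Fc, hcne]
      rw [this, List.flatMap_cons, List.append_assoc, ← hF (ws.flatMap (explodeB m))]

-- every word produced by str.split() is nonempty
theorem split₀_go_ne_nil : ∀ (s cur : List Char) (acc : List (List Char)),
    (∀ w ∈ acc, w ≠ []) → ∀ w ∈ PySem.Chars.split₀.go s cur acc, w ≠ [] := by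
  intro s
  induction s with
  | nil =>
      intro cur acc hacc w hw
      rw [PySem.Chars.split₀.go] at hw
      split at hw
      · exact hacc w (by simpa using hw)
      · rename_i hcur
        simp only [List.mem_reverse, List.mem_cons] at hw
        rcases hw with h | h
        · subst h
          simpa using hcur
        · exact hacc w h
  | cons ch rest ih =>
      intro cur acc hacc w hw
      rw [PySem.Chars.split₀.go] at hw
      split at hw
      · split at hw
        · exact ih [] acc hacc w hw
        · rename_i hcur
          refine ih [] _ ?_ w hw
          intro x hx
          simp only [List.mem_cons] at hx
          rcases hx with h | h
          · subst h
            simpa using hcur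
          · exact hacc x h
      · exact ih (ch :: cur) acc hacc w hw

theorem split₀_ne_nil (s : List Char) : ∀ w ∈ PySem.Chars.split₀ s, w ≠ [] := by
  intro w hw
  exact split₀_go_ne_nil s [] [] (by simp) w hw

-- ===== VERDICT (by name: the statement is the Claim_ definition above) =====
theorem split_by_words_py_spec : Claim_equal_split_by_words_py := by
  intro text m hdom hpre
  unfold Spec_split_by_words_py
  rcases hpre with hm | hempty
  · simp only [split_by_words_py, split_by_words_py_alt]
    rw [PySem.List.foldl_append_eq_flatMap]
    rw [foldA_eq m hm (PySem.Chars.split₀ text.toList) (split₀_ne_nil text.toList) [] []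
      (by simp only [List.length_nil, Nat.cast_zero]; omega)]
    simp [Fc]
  · simp [split_by_words_py, split_by_words_py_alt, hempty, packB]
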